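-- pv_equiv track=rewrite | github.com/omiguel144/loomi | LoomiScraper 4/attached_assets/main_1764442261601.py | extract_srcset_urls
-- ===== SOURCE A (Python) =====
-- def extract_srcset_urls(srcset_str, limit=5):
--     """Extract URLs from srcset attribute. Splits on commas, takes URL portion, limits to 5."""
--     if not srcset_str:
--         return []
--
--     urls = []
--     for entry in srcset_str.split(','):
--         entry = entry.strip()
--         if not entry:
--             continue
--         # Format is typically: "url 1x" or "url 100w" - split by whitespace and take first part
--         url_part = entry.split()[0].strip()
--         if url_part and url_part not in urls:  # Avoid duplicates
--             urls.append(url_part)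
--             if len(urls) >= limit:
--                 break
--
--     return urls
-- ===== SOURCE B (Python) =====
-- def extract_srcset_urls(srcset_str, limit=5):
--     """Extract URLs from srcset attribute: first token of each non-blank comma entry,
--     order-preserving dedup, capped at limit (non-positive limit yields no URLs)."""
--     if not srcset_str:
--         return []
--     parts = [e.strip().split()[0] for e in srcset_str.split(',') if e.strip()]
--     unique = list(dict.fromkeys(parts))
--     return unique[:limit] if limit > 0 else []
-- ===== Notes on version B (the rewrite author's own statement) =====
-- stated objective: simpler
-- what changed: Replaces A's incremental loop with per-entry membership scan and mid-loop break by a whole-list comprehension, an order-preserving dict.fromkeys dedup, and one final slice; for non-positive limit B honours the cap and returns [].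
-- intended difference: On inputs with limit <= 0 that contain at least one non-blank comma entry, A returns a one-element list with the first URL (its append-then-check loop always takes one before testing the cap), while B returns [], the intended at-most-limit result. — e.g. on extract_srcset_urls("u 1x", 0): A returns ["u"], B returns []
import Mathlib
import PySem

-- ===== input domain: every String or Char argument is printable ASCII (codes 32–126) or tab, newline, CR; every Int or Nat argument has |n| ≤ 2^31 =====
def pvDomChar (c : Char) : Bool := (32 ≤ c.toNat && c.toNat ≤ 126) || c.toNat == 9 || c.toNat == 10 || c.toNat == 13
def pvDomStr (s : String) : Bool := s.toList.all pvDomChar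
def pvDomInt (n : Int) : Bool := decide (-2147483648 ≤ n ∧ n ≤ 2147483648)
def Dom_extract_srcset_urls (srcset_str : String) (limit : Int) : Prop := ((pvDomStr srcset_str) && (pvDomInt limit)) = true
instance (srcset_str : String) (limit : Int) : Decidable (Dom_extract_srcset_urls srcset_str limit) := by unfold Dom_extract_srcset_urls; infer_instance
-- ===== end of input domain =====

-- B replaces A's incremental loop + membership scan + break by comprehension, dict.fromkeys dedup and a slice (objective: simpler);
-- for non-positive limit B returns [] where A returns the first URL (stated as the intended difference D_ below).


-- ===== PORT A =====
-- the for-loop of A: entries still to process, accumulated urls; 'break' = return urls immediately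
def pvLoopA (limit : Int) (entries : List String) (urls : List String) : List String :=
  match entries with
  | [] => urls
  | e :: rest =>
    let entry := PySem.Str.strip e
    if entry = "" then pvLoopA limit rest urls
    else
      -- entry is nonempty after strip, so entry.split() is nonempty and Python's [0] never raises: headD's default is dead
      let url_part := PySem.Str.strip ((PySem.Str.split₀ entry).headD "")
      if url_part ≠ "" ∧ url_part ∉ urls then
        let urls' := urls ++ [url_part]
        if limit ≤ (urls'.length : Int) then urls' else pvLoopA limit rest urls'
      else pvLoopA limit rest urls

def extract_srcset_urls (srcset_str : String) (limit : Int) : List String :=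
  if srcset_str = "" then []
  else pvLoopA limit ((PySem.Str.split? srcset_str ",").getD []) []  -- sep "," ≠ "": split? is always some, getD's default is dead

-- ===== PORT B =====
-- e.strip().split()[0] — the guard 'if e.strip()' makes the stripped entry nonempty, so [0] never raises: headD's default is dead
def pvTok (e : String) : String := (PySem.Str.split₀ (PySem.Str.strip e)).headD ""

def extract_srcset_urls_alt (srcset_str : String) (limit : Int) : List String :=
  if srcset_str = "" then []
  else
    let parts := (((PySem.Str.split? srcset_str ",").getD []).filter (fun e => !(PySem.Str.strip e == ""))).map pvTok
    let unique := PySem.List.dedup parts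
    if 0 < limit then PySem.List.slice unique none (some limit) else []

-- ===== PRECONDITION & SPEC =====
-- On inputs with limit ≤ 0 that contain at least one non-blank comma entry (i.e. some non-whitespace, non-comma character),
-- A returns a one-element list with the first URL (its append-then-check loop always takes one before testing the cap),
-- while B returns [], the intended at-most-limit result.
def D_extract_srcset_urls (srcset_str : String) (limit : Int) : Prop :=
  limit ≤ 0 ∧ srcset_str.toList.any (fun c => !PySem.Chars.isspace c && !(c == ',')) = true
instance (srcset_str : String) (limit : Int) : Decidable (D_extract_srcset_urls srcset_str limit) := by unfold D_extract_srcset_urls; infer_instance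

def Spec_extract_srcset_urls (srcset_str : String) (limit : Int) (out : List String) : Prop :=
  ¬ D_extract_srcset_urls srcset_str limit → out = extract_srcset_urls_alt srcset_str limit
instance (srcset_str : String) (limit : Int) (out : List String) : Decidable (Spec_extract_srcset_urls srcset_str limit out) := by unfold Spec_extract_srcset_urls; infer_instance

def pvDiffWitness_extract_srcset_urls : String × Int := ("u 1x", 0)
def pvDiffWitnessOut_extract_srcset_urls : (List String) × (List String) := (["u"], [])

-- ===== CLAIM (what is proved, stated in full; the proofs are below) =====
def Claim_unchanged_extract_srcset_urls : Prop := ∀ (srcset_str : String) (limit : Int), Dom_extract_srcset_urls srcset_str limit → Spec_extract_srcset_urls srcset_str limit (extract_srcset_urls srcset_str limit)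
def Claim_changed_extract_srcset_urls : Prop := Dom_extract_srcset_urls (pvDiffWitness_extract_srcset_urls.1) (pvDiffWitness_extract_srcset_urls.2) ∧ D_extract_srcset_urls (pvDiffWitness_extract_srcset_urls.1) (pvDiffWitness_extract_srcset_urls.2) ∧ extract_srcset_urls (pvDiffWitness_extract_srcset_urls.1) (pvDiffWitness_extract_srcset_urls.2) = pvDiffWitnessOut_extract_srcset_urls.1 ∧ extract_srcset_urls_alt (pvDiffWitness_extract_srcset_urls.1) (pvDiffWitness_extract_srcset_urls.2) = pvDiffWitnessOut_extract_srcset_urls.2 ∧ pvDiffWitnessOut_extract_srcset_urls.1 ≠ pvDiffWitnessOut_extract_srcset_urls.2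
def Claim_exact_extract_srcset_urls : Prop := ∀ (srcset_str : String) (limit : Int), Dom_extract_srcset_urls srcset_str limit → D_extract_srcset_urls srcset_str limit → extract_srcset_urls srcset_str limit ≠ extract_srcset_urls_alt srcset_str limit

-- ===== LEMMAS AND PROOFS =====

-- generic list facts
theorem pvMemDropWhile {α : Type} {p : α → Bool} {l : List α} {c : α}
    (hc : c ∈ l) (hp : p c = false) : c ∈ l.dropWhile p := by
  induction l with
  | nil => cases hc
  | cons a t ih =>
    by_cases ha : p a = true
    · rw [List.dropWhile_cons_of_pos ha]
      rcases List.mem_cons.mp hc with rfl | h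
      · rw [hp] at ha; cases ha
      · exact ih h
    · rw [List.dropWhile_cons_of_neg ha]; exact hc

theorem pvRstripPrefix (m : List Char) : PySem.Chars.rstrip m <+: m := by
  have h := List.dropWhile_suffix (l := m.reverse) PySem.Chars.isspace
  obtain ⟨t, ht⟩ := h
  refine ⟨t.reverse, ?_⟩
  have : (t ++ List.dropWhile PySem.Chars.isspace m.reverse).reverse = m.reverse.reverse := by rw [ht]
  simpa [PySem.Chars.rstrip, List.reverse_append] using this

-- strip facts
theorem pvStripNeNil {l : List Char} {c : Char} (hc : c ∈ l) (hs : PySem.Chars.isspace c = false) :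
    PySem.Chars.strip l ≠ [] := by
  have h1 : c ∈ PySem.Chars.lstrip l := pvMemDropWhile hc hs
  have h2 : c ∈ PySem.Chars.rstrip (PySem.Chars.lstrip l) := by
    have : c ∈ (PySem.Chars.lstrip l).reverse := List.mem_reverse.mpr h1
    have := pvMemDropWhile this hs
    simpa [PySem.Chars.rstrip] using List.mem_reverse.mpr this
  simpa [PySem.Chars.strip] using List.ne_nil_of_mem h2

theorem pvStripAllSpace {l : List Char} (h : ∀ c ∈ l, PySem.Chars.isspace c = true) :
    PySem.Chars.strip l = [] := by
  have : PySem.Chars.lstrip l = [] := List.dropWhile_eq_nil_iff.mpr h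
  simp [PySem.Chars.strip, this, PySem.Chars.rstrip]

theorem pvDropWhileHead {α : Type} {p : α → Bool} {l : List α} {d : α} {t : List α}
    (h : l.dropWhile p = d :: t) : p d = false := by
  induction l with
  | nil => simp at h
  | cons a s ih =>
    by_cases ha : p a = true
    · rw [List.dropWhile_cons_of_pos ha] at h; exact ih h
    · rw [List.dropWhile_cons_of_neg ha] at h
      cases h; simpa using ha

theorem pvStripHasNonspace {l : List Char} (h : PySem.Chars.strip l ≠ []) :
    ∃ c ∈ PySem.Chars.strip l, PySem.Chars.isspace c = false := by
  obtain ⟨d, t, hdt⟩ := List.exists_cons_of_ne_nil h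
  have hpre : PySem.Chars.strip l <+: PySem.Chars.lstrip l := by
    simpa [PySem.Chars.strip] using pvRstripPrefix (PySem.Chars.lstrip l)
  obtain ⟨w, hw⟩ := hpre
  have hls : PySem.Chars.lstrip l = d :: (t ++ w) := by
    rw [← hw, hdt]; simp
  have hd : PySem.Chars.isspace d = false := pvDropWhileHead (p := PySem.Chars.isspace) hls
  exact ⟨d, by rw [hdt]; exact List.mem_cons_self, hd⟩

theorem pvDropWhileSelf {α : Type} {p : α → Bool} {l : List α}
    (h : ∀ c ∈ l, p c = false) : l.dropWhile p = l := by
  cases l with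
  | nil => rfl
  | cons a t =>
    rw [List.dropWhile_cons_of_neg]
    simp [h a List.mem_cons_self]

theorem pvStripSelf {l : List Char} (h : ∀ c ∈ l, PySem.Chars.isspace c = false) :
    PySem.Chars.strip l = l := by
  have h1 : PySem.Chars.lstrip l = l := pvDropWhileSelf h
  have h2 : PySem.Chars.rstrip l = l := by
    have : l.reverse.dropWhile PySem.Chars.isspace = l.reverse :=
      pvDropWhileSelf (fun c hc => h c (List.mem_reverse.mp hc))
    simp [PySem.Chars.rstrip, this]
  simp [PySem.Chars.strip, h1, h2]

-- split₀.go: every produced piece is nonempty and whitespace-free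
theorem pvSplit0Go (s : List Char) : ∀ (cur : List Char) (acc : List (List Char)),
    (∀ p ∈ acc, p ≠ [] ∧ ∀ c ∈ p, PySem.Chars.isspace c = false) →
    (∀ c ∈ cur, PySem.Chars.isspace c = false) →
    ∀ p ∈ PySem.Chars.split₀.go s cur acc, p ≠ [] ∧ ∀ c ∈ p, PySem.Chars.isspace c = false := by
  induction s with
  | nil =>
    intro cur acc hacc hcur p hp
    rw [PySem.Chars.split₀.go] at hp
    by_cases hc : cur.isEmpty
    · simp [hc] at hp
      exact hacc p hp
    · simp [hc] at hp
      rcases hp with h | h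
      · exact hacc p h
      · subst h
        constructor
        · simpa using fun h => hc (by simp [List.isEmpty_iff, h])
        · intro c hcm; exact hcur c (List.mem_reverse.mp hcm)
  | cons c rest ih =>
    intro cur acc hacc hcur p hp
    rw [PySem.Chars.split₀.go] at hp
    by_cases hsp : PySem.Chars.isspace c = true
    · simp only [hsp, if_true] at hp
      by_cases hc : cur.isEmpty
      · simp only [hc, if_true] at hp
        exact ih [] acc hacc (by simp) p hp
      · simp only [hc] at hp
        refine ih [] (cur.reverse :: acc) ?_ (by simp) p hp
        intro q hq
        rcases List.mem_cons.mp hq with rfl | h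
        · exact ⟨by simpa using fun h => hc (by simp [List.isEmpty_iff, h]),
            fun d hd => hcur d (List.mem_reverse.mp hd)⟩
        · exact hacc q h
    · simp only [hsp] at hp
      refine ih (c :: cur) acc hacc ?_ p hp
      intro d hd
      rcases List.mem_cons.mp hd with rfl | h
      · simpa using hsp
      · exact hcur d h

-- split₀.go is nonempty when there is a non-space character (or pending state)
theorem pvSplit0GoNe (s : List Char) : ∀ (cur : List Char) (acc : List (List Char)),
    ((∃ c ∈ s, PySem.Chars.isspace c = false) ∨ cur ≠ [] ∨ acc ≠ []) →
    PySem.Chars.split₀.go s cur acc ≠ [] := by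
  induction s with
  | nil =>
    intro cur acc h
    rw [PySem.Chars.split₀.go]
    rcases h with ⟨c, hc, _⟩ | h | h
    · cases hc
    · simp [h]
    · by_cases hc : cur.isEmpty <;> simp [hc, h]
  | cons c rest ih =>
    intro cur acc h
    rw [PySem.Chars.split₀.go]
    by_cases hsp : PySem.Chars.isspace c = true
    · simp only [hsp, if_true]
      have h' : (∃ d ∈ rest, PySem.Chars.isspace d = false) ∨ cur ≠ [] ∨ acc ≠ [] := by
        rcases h with ⟨d, hd, hds⟩ | h
        · rcases List.mem_cons.mp hd with rfl | hd'
          · rw [hsp] at hds; cases hds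
          · exact Or.inl ⟨d, hd', hds⟩
        · exact Or.inr h
      by_cases hc : cur.isEmpty
      · have hcur : cur = [] := by simpa [List.isEmpty_iff] using hc
        simp only [hc, if_true]
        refine ih [] acc ?_
        rcases h' with h' | h' | h'
        · exact Or.inl h'
        · exact absurd hcur h'
        · exact Or.inr (Or.inr h')
      · simp only [hc, if_false]
        exact ih [] (cur.reverse :: acc) (Or.inr (Or.inr (by simp)))
    · simp only [hsp, if_false]
      exact ih (c :: cur) acc (Or.inr (Or.inl (by simp)))

-- splitOn.go on sep = [','] : closed-form equations (structural recursion on the fuel)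
theorem pvGoNilEq (fuel : Nat) (cur : List Char) (acc : List (List Char)) :
    PySem.Chars.splitOn.go [','] (fuel+1) [] cur acc = (cur.reverse :: acc).reverse := rfl

theorem pvGoConsEq (fuel : Nat) (c : Char) (rest cur : List Char) (acc : List (List Char)) :
    PySem.Chars.splitOn.go [','] (fuel+1) (c :: rest) cur acc =
      if [','].isPrefixOf (c :: rest) = true then
        PySem.Chars.splitOn.go [','] fuel rest [] (cur.reverse :: acc)
      else PySem.Chars.splitOn.go [','] fuel rest (c :: cur) acc := rfl

-- splitOn.go on sep = [','] : all characters of all pieces satisfy Q, given Q on non-comma input chars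
theorem pvSplitOnGoQ (Q : Char → Prop) : ∀ (fuel : Nat) (l cur : List Char) (acc : List (List Char)),
    l.length < fuel →
    (∀ p ∈ acc, ∀ c ∈ p, Q c) → (∀ c ∈ cur, Q c) → (∀ c ∈ l, c ≠ ',' → Q c) →
    ∀ p ∈ PySem.Chars.splitOn.go [','] fuel l cur acc, ∀ c ∈ p, Q c := by
  intro fuel
  induction fuel with
  | zero => intro l cur acc h; omega
  | succ n ih =>
    intro l cur acc hlen hacc hcur hl p hp
    cases l with
    | nil =>
      rw [pvGoNilEq] at hp
      rcases List.mem_cons.mp (List.mem_reverse.mp hp) with rfl | h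
      · intro c hc; exact hcur c (List.mem_reverse.mp hc)
      · exact hacc p h
    | cons c rest =>
      rw [pvGoConsEq] at hp
      by_cases hcomma : c = ','
      · have hpre : [','].isPrefixOf (c :: rest) = true := by simp [List.isPrefixOf, hcomma]
        rw [if_pos hpre] at hp
        refine ih rest [] (cur.reverse :: acc) (by simp at hlen ⊢; omega)
          ?_ (by simp) (fun d hd => hl d (List.mem_cons_of_mem _ hd)) p hp
        intro q hq
        rcases List.mem_cons.mp hq with rfl | h
        · intro d hd; exact hcur d (List.mem_reverse.mp hd)
        · exact hacc q h
      · have hpre : [','].isPrefixOf (c :: rest) = false := by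
          simp [List.isPrefixOf]; exact fun h => hcomma h.symm
        rw [hpre, if_neg (by simp)] at hp
        refine ih rest (c :: cur) acc (by simp at hlen ⊢; omega) hacc
          ?_ (fun d hd => hl d (List.mem_cons_of_mem _ hd)) p hp
        intro d hd
        rcases List.mem_cons.mp hd with rfl | h
        · exact hl d List.mem_cons_self hcomma
        · exact hcur d h

-- splitOn.go on sep = [','] : a non-comma character of the pending state ends up in some piece
theorem pvSplitOnGoMem : ∀ (fuel : Nat) (l cur : List Char) (acc : List (List Char)) (c : Char),
    l.length < fuel → c ≠ ',' →
    (c ∈ cur ∨ c ∈ l ∨ ∃ q ∈ acc, c ∈ q) →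
    ∃ p ∈ PySem.Chars.splitOn.go [','] fuel l cur acc, c ∈ p := by
  intro fuel
  induction fuel with
  | zero => intro l cur acc c h; omega
  | succ n ih =>
    intro l cur acc c hlen hc hmem
    cases l with
    | nil =>
      rw [pvGoNilEq]
      rcases hmem with h | h | ⟨q, hq, hcq⟩
      · exact ⟨cur.reverse, by simp, List.mem_reverse.mpr h⟩
      · cases h
      · exact ⟨q, List.mem_reverse.mpr (List.mem_cons_of_mem _ hq), hcq⟩
    | cons d rest =>
      rw [pvGoConsEq]
      by_cases hcomma : d = ','
      · have hpre : [','].isPrefixOf (d :: rest) = true := by simp [List.isPrefixOf, hcomma]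
        rw [if_pos hpre]
        refine ih rest [] (cur.reverse :: acc) c (by simp at hlen ⊢; omega) hc ?_
        rcases hmem with h | h | ⟨q, hq, hcq⟩
        · exact Or.inr (Or.inr ⟨cur.reverse, List.mem_cons_self, List.mem_reverse.mpr h⟩)
        · rcases List.mem_cons.mp h with rfl | h'
          · exact absurd hcomma hc
          · exact Or.inr (Or.inl h')
        · exact Or.inr (Or.inr ⟨q, List.mem_cons_of_mem _ hq, hcq⟩)
      · have hpre : [','].isPrefixOf (d :: rest) = false := by
          simp [List.isPrefixOf]; exact fun h => hcomma h.symm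
        rw [hpre, if_neg (by simp)]
        refine ih rest (d :: cur) acc c (by simp at hlen ⊢; omega) hc ?_
        rcases hmem with h | h | ⟨q, hq, hcq⟩
        · exact Or.inl (List.mem_cons_of_mem _ h)
        · rcases List.mem_cons.mp h with rfl | h'
          · exact Or.inl List.mem_cons_self
          · exact Or.inr (Or.inl h')
        · exact Or.inr (Or.inr ⟨q, hq, hcq⟩)

-- string/list bridges
theorem pvStrEqEmpty (s : String) : s = "" ↔ s.toList = [] := by
  constructor
  · intro h; subst h; rfl
  · intro h
    have := congrArg String.ofList h
    simpa [String.ofList_toList] using this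

-- the token of a non-blank entry: nonempty, and stripping it again is a no-op
theorem pvTokSpec {e : String} (h : PySem.Str.strip e ≠ "") :
    pvTok e ≠ "" ∧ PySem.Str.strip (pvTok e) = pvTok e := by
  have hnil : PySem.Chars.strip e.toList ≠ [] := by
    intro hn
    apply h
    rw [pvStrEqEmpty, PySem.Str.toList_strip, hn]
  obtain ⟨c, hc, hcs⟩ := pvStripHasNonspace hnil
  have hne : PySem.Chars.split₀ (PySem.Chars.strip e.toList) ≠ [] := by
    simpa [PySem.Chars.split₀] using pvSplit0GoNe _ [] [] (Or.inl ⟨c, hc, hcs⟩)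
  obtain ⟨hd, tl, hsp⟩ := List.exists_cons_of_ne_nil hne
  have hsp' : PySem.Chars.split₀.go (PySem.Chars.strip e.toList) [] [] = hd :: tl := by
    simpa [PySem.Chars.split₀] using hsp
  have hhd := pvSplit0Go _ [] [] (by simp) (by simp) hd (by rw [hsp']; exact List.mem_cons_self)
  have htok : pvTok e = String.ofList hd := by
    simp [pvTok, PySem.Str.split₀, PySem.Str.toList_strip, hsp]
  constructor
  · rw [htok]
    intro hcontra
    exact hhd.1 (by simpa using congrArg String.toList hcontra)
  · rw [htok]
    have : PySem.Chars.strip hd = hd := pvStripSelf hhd.2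
    simp [PySem.Str.strip, this]

-- Set.add only appends: the accumulator is a prefix of any later foldl state
theorem pvFoldlAddPrefix (ts : List String) : ∀ u : List String,
    u <+: List.foldl PySem.Set.add u ts := by
  induction ts with
  | nil => intro u; simp
  | cons t ts ih =>
    intro u
    have h1 : u <+: PySem.Set.add u t := by
      unfold PySem.Set.add
      split
      · exact List.prefix_rfl
      · exact ⟨[t], rfl⟩
    exact h1.trans (by simpa [List.foldl_cons] using ih (PySem.Set.add u t))

theorem pvTakeFoldlAdd (ts : List String) (u : List String) :
    List.take u.length (List.foldl PySem.Set.add u ts) = u := by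
  obtain ⟨w, hw⟩ := pvFoldlAddPrefix ts u
  rw [← hw, List.take_left]

-- main loop invariant: pvLoopA computes the limit-truncated incremental dedup of the tokens
theorem pvLoopAInv (limit : Int) (hpos : 0 < limit) : ∀ (es urls : List String),
    (urls.length : Int) < limit →
    pvLoopA limit es urls =
      List.take limit.toNat (List.foldl PySem.Set.add urls
        ((es.filter (fun e => !(PySem.Str.strip e == ""))).map pvTok)) := by
  intro es
  induction es with
  | nil =>
    intro urls hlen
    rw [pvLoopA]
    rw [List.filter_nil, List.map_nil, List.foldl_nil, List.take_of_length_le (by omega)]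
  | cons e rest ih =>
    intro urls hlen
    rw [pvLoopA]
    by_cases hs : PySem.Str.strip e = ""
    · simp only [hs]
      rw [List.filter_cons_of_neg (by simp [hs])]
      exact ih urls hlen
    · rw [if_neg hs]
      obtain ⟨htne, htfix⟩ := pvTokSpec hs
      have hurl : PySem.Str.strip ((PySem.Str.split₀ (PySem.Str.strip e)).headD "") = pvTok e := htfix
      rw [List.filter_cons_of_pos (by simp [hs]), List.map_cons, List.foldl_cons]
      by_cases hmem : pvTok e ∈ urls
      · have hadd : PySem.Set.add urls (pvTok e) = urls := by
          unfold PySem.Set.add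
          rw [if_pos (by simpa using hmem)]
        have hcnd : ¬(PySem.Str.strip ((PySem.Str.split₀ (PySem.Str.strip e)).headD "") ≠ "" ∧
            PySem.Str.strip ((PySem.Str.split₀ (PySem.Str.strip e)).headD "") ∉ urls) := by
          rw [hurl]; exact fun hcontra => hcontra.2 hmem
        rw [if_neg hcnd, hadd]
        exact ih urls hlen
      · have hadd : PySem.Set.add urls (pvTok e) = urls ++ [pvTok e] := by
          unfold PySem.Set.add
          rw [if_neg (by simpa using hmem)]
        have hcnd : PySem.Str.strip ((PySem.Str.split₀ (PySem.Str.strip e)).headD "") ≠ "" ∧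
            PySem.Str.strip ((PySem.Str.split₀ (PySem.Str.strip e)).headD "") ∉ urls := by
          rw [hurl]; exact ⟨htne, hmem⟩
        rw [if_pos hcnd, hurl, hadd]
        by_cases hcap : limit ≤ ((urls ++ [pvTok e]).length : Int)
        · rw [if_pos hcap]
          have hlim : limit.toNat = (urls ++ [pvTok e]).length := by
            simp at hcap ⊢; omega
          rw [hlim, pvTakeFoldlAdd]
        · rw [if_neg hcap]
          exact ih (urls ++ [pvTok e]) (by simp at hcap ⊢; omega)

-- when every entry is blank, A's loop returns its accumulator unchanged
theorem pvLoopABlank (limit : Int) : ∀ (es urls : List String),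
    (∀ e ∈ es, PySem.Str.strip e = "") → pvLoopA limit es urls = urls := by
  intro es
  induction es with
  | nil => intro urls _; rw [pvLoopA]
  | cons e rest ih =>
    intro urls h
    rw [pvLoopA]
    simp only [h e List.mem_cons_self]
    exact ih urls (fun e' he' => h e' (List.mem_cons_of_mem _ he'))

-- when some entry is non-blank (or urls already nonempty), A's loop returns a nonempty list
theorem pvLoopANe (limit : Int) : ∀ (es urls : List String),
    (urls ≠ [] ∨ ∃ e ∈ es, PySem.Str.strip e ≠ "") → pvLoopA limit es urls ≠ [] := by
  intro es
  induction es with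
  | nil =>
    intro urls h
    rw [pvLoopA]
    rcases h with h | ⟨e, he, _⟩
    · exact h
    · cases he
  | cons e rest ih =>
    intro urls h
    rw [pvLoopA]
    by_cases hs : PySem.Str.strip e = ""
    · rw [if_pos hs]
      refine ih urls ?_
      rcases h with h | ⟨e', he', hs'⟩
      · exact Or.inl h
      · rcases List.mem_cons.mp he' with rfl | he''
        · exact absurd hs hs'
        · exact Or.inr ⟨e', he'', hs'⟩
    · rw [if_neg hs]
      obtain ⟨htne, htfix⟩ := pvTokSpec hs
      by_cases hcond : PySem.Str.strip ((PySem.Str.split₀ (PySem.Str.strip e)).headD "") ≠ "" ∧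
          PySem.Str.strip ((PySem.Str.split₀ (PySem.Str.strip e)).headD "") ∉ urls
      · rw [if_pos hcond]
        by_cases hcap : limit ≤ ((urls ++ [PySem.Str.strip ((PySem.Str.split₀ (PySem.Str.strip e)).headD "")]).length : Int)
        · rw [if_pos hcap]; simp
        · rw [if_neg hcap]
          exact ih _ (Or.inl (by simp))
      · rw [if_neg hcond]
        refine ih urls (Or.inl ?_)
        have hurl : PySem.Str.strip ((PySem.Str.split₀ (PySem.Str.strip e)).headD "") = pvTok e := htfix
        rw [hurl] at hcond
        push_neg at hcond
        exact List.ne_nil_of_mem (hcond htne)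

-- the entries A and B iterate over, at the Chars level
theorem pvEntriesEq (s : String) :
    (PySem.Str.split? s ",").getD [] = (PySem.Chars.splitOn s.toList [',']).map String.ofList := by
  simp [PySem.Str.split?, PySem.Chars.split?]

-- ===== VERDICT (by name: the statement is the Claim_ definition above) =====
theorem extract_srcset_urls_spec : Claim_unchanged_extract_srcset_urls := by
  intro s limit _ hnd
  by_cases hs : s = ""
  · simp [extract_srcset_urls, extract_srcset_urls_alt, hs]
  · by_cases hpos : 0 < limit
    · rw [extract_srcset_urls, if_neg hs, extract_srcset_urls_alt, if_neg hs]
      simp only [if_pos hpos]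
      rw [PySem.List.slice_to _ (le_of_lt hpos)]
      rw [pvLoopAInv limit hpos _ [] (by simpa using hpos)]
      rfl
    · -- limit ≤ 0 and (from ¬D_) every character of s is whitespace or a comma: both sides are []
      have hany : ¬ (s.toList.any (fun c => !PySem.Chars.isspace c && !(c == ',')) = true) := by
        intro h
        exact hnd ⟨by omega, h⟩
      have hchars : ∀ c ∈ s.toList, c ≠ ',' → PySem.Chars.isspace c = true := by
        intro c hc hcc
        by_contra hcs
        exact hany (List.any_eq_true.mpr ⟨c, hc, by simp [hcs, hcc]⟩)
      rw [extract_srcset_urls, if_neg hs, extract_srcset_urls_alt, if_neg hs]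
      simp only [if_neg hpos]
      refine pvLoopABlank limit _ [] ?_
      intro e he
      rw [pvEntriesEq] at he
      obtain ⟨p, hp, rfl⟩ := List.mem_map.mp he
      have hq := pvSplitOnGoQ (fun c => PySem.Chars.isspace c = true) (s.toList.length + 1) s.toList [] []
        (by omega) (by simp) (by simp) hchars p (by simpa [PySem.Chars.splitOn] using hp)
      rw [pvStrEqEmpty, PySem.Str.toList_strip, String.toList_ofList]
      exact pvStripAllSpace hq

theorem extract_srcset_urls_changed : Claim_changed_extract_srcset_urls := by
  unfold Claim_changed_extract_srcset_urls; decide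

theorem extract_srcset_urls_tight : Claim_exact_extract_srcset_urls := by
  intro s limit _ hd heq
  obtain ⟨hlim, hany⟩ := hd
  obtain ⟨c, hc, hcb⟩ := List.any_eq_true.mp hany
  have hcb' : PySem.Chars.isspace c = false ∧ ¬ c = ',' := by simpa using hcb
  have hcs : PySem.Chars.isspace c = false := hcb'.1
  have hcc : c ≠ ',' := hcb'.2
  have hs : s ≠ "" := by
    intro h
    rw [pvStrEqEmpty] at h
    rw [h] at hc
    cases hc
  -- B returns []
  have hb : extract_srcset_urls_alt s limit = [] := by
    rw [extract_srcset_urls_alt, if_neg hs]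
    simp only [if_neg (by omega : ¬ 0 < limit)]
  -- A returns a nonempty list
  obtain ⟨p, hp, hcp⟩ := pvSplitOnGoMem (s.toList.length + 1) s.toList [] [] c (by omega) hcc
    (Or.inr (Or.inl hc))
  have hmem : String.ofList p ∈ (PySem.Str.split? s ",").getD [] := by
    rw [pvEntriesEq]
    exact List.mem_map.mpr ⟨p, by simpa [PySem.Chars.splitOn] using hp, rfl⟩
  have hpne : PySem.Str.strip (String.ofList p) ≠ "" := by
    intro hcontra
    apply pvStripNeNil hcp hcs
    have := congrArg String.toList hcontra
    simpa [PySem.Str.toList_strip] using this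
  have ha : extract_srcset_urls s limit ≠ [] := by
    rw [extract_srcset_urls, if_neg hs]
    exact pvLoopANe limit _ [] (Or.inr ⟨String.ofList p, hmem, hpne⟩)
  rw [heq, hb] at ha
  exact ha rfl
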